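-- pv_equiv track=rewrite | github.com/tongxin/paddle-einsum | einsum.py | reorder_ops
-- ===== SOURCE A (Python) =====
-- def reorder_ops(nop_axes):
--     nop = len(nop_axes)
--     ndim = len(nop_axes[0])
--     opis = list(range(nop))
--     perm = []
--
--     for i in range(ndim)[::-1]:
--         if not opis:
--             break
--         to_remove = [opi for opi in opis if nop_axes[opi][i] != -1]
--         for opi in to_remove:
--             perm.append(opi)
--             opis.remove(opi)
--
--     return perm
-- ===== SOURCE B (Python) =====
-- def reorder_ops(nop_axes):
--     ndim = len(nop_axes[0])
--     buckets = [[] for _ in range(ndim)]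
--     for opi, row in enumerate(nop_axes):
--         m = -1
--         for i in range(ndim):
--             if row[i] != -1:
--                 m = i
--         if m >= 0:
--             buckets[m].append(opi)
--     perm = []
--     for i in range(ndim - 1, -1, -1):
--         perm.extend(buckets[i])
--     return perm
-- ===== Notes on version B (the rewrite author's own statement) =====
-- stated objective: alternative
-- what changed: Replaces A's axis-major repeated select-and-remove over a shrinking operand list with a single pass computing each operand's highest non-(-1) axis, bucketing operand indices by that key, and emitting buckets in descending axis order (a counting-sort emission).
import Mathlib
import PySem

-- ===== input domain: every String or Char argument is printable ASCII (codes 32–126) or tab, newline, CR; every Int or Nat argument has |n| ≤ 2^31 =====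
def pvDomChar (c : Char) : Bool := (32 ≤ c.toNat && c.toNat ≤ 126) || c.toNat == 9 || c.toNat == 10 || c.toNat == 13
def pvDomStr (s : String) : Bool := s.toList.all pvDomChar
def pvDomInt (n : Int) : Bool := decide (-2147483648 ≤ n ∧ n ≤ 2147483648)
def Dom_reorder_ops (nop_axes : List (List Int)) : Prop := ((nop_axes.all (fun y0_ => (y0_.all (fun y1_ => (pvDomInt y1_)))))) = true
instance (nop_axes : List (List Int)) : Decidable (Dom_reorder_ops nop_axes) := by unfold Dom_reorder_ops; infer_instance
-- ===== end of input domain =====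

-- B replaces A's axis-major select-and-remove with one key-computing pass plus
-- bucket emission; equal return value on all inputs where the Python A returns.

-- ===== PORT A =====
-- body of A's 'for i in …' loop (break modeled by the no-op guard: once opis is
-- empty the body does nothing anyway)
def ropsStep (nop_axes : List (List Int)) (st : List Int × List Int) (i : Int) :
    List Int × List Int :=
  if st.2 = [] then st
  else
    (st.2.filter (fun opi =>
        PySem.List.pyGetD (PySem.List.pyGetD nop_axes opi []) i 0 != -1)).foldl
      (fun st2 opi => (st2.1 ++ [opi], (PySem.List.remove? st2.2 opi).getD st2.2)) st

def reorder_ops (nop_axes : List (List Int)) : List Int :=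
  let nop : Int := nop_axes.length
  let ndim : Int := (PySem.List.pyGetD nop_axes 0 []).length
  (((PySem.List.pyRange 0 ndim 1).reverse).foldl (ropsStep nop_axes)
    ([], PySem.List.pyRange 0 nop 1)).1

-- ===== PORT B =====
-- inner 'for i in range(ndim)' loop of Source B: last axis index with row[i] != -1 (or -1)
def ropsKey (row : List Int) (ndim : Int) : Int :=
  (PySem.List.pyRange 0 ndim 1).foldl
    (fun m i => if PySem.List.pyGetD row i 0 != -1 then i else m) (-1)

def reorder_ops_alt (nop_axes : List (List Int)) : List Int :=
  let ndim : Int := (PySem.List.pyGetD nop_axes 0 []).length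
  let buckets : List (List Int) :=
    (PySem.List.enumerate nop_axes 0).foldl
      (fun bs pr =>
        let m := ropsKey pr.2 ndim
        if 0 ≤ m then PySem.List.pySetD bs m (PySem.List.pyGetD bs m [] ++ [pr.1])
        else bs)
      ((PySem.List.pyRange 0 ndim 1).map (fun _ => []))
  (PySem.List.pyRange (ndim - 1) (-1) (-1)).foldl
    (fun perm i => perm ++ PySem.List.pyGetD buckets i []) []

-- ===== PRECONDITION & SPEC =====
-- A raises IndexError on an empty operand list (nop_axes[0]) and, when ndim > 0,
-- on any row shorter than ndim (nop_axes[opi][i] at i = ndim-1); Pre_ excludes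
-- exactly those inputs.  (The two ports, being total with PySem defaults, in fact
-- agree on every input, so the proofs below do not need Pre_.)
def Pre_reorder_ops (nop_axes : List (List Int)) : Prop :=
  nop_axes ≠ [] ∧ ∀ row ∈ nop_axes, (nop_axes.headD []).length ≤ row.length
instance (nop_axes : List (List Int)) : Decidable (Pre_reorder_ops nop_axes) := by
  unfold Pre_reorder_ops; infer_instance
def pvWitness_reorder_ops : List (List Int) := [[0, -1], [-1, 3], [-1, -1]]

def Spec_reorder_ops (nop_axes : List (List Int)) (out : List Int) : Prop := out = reorder_ops_alt nop_axes
instance (nop_axes : List (List Int)) (out : List Int) : Decidable (Spec_reorder_ops nop_axes out) := by unfold Spec_reorder_ops; infer_instance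

-- ===== CLAIM (what is proved, stated in full; the proofs are below) =====
def Claim_equal_reorder_ops : Prop := ∀ (nop_axes : List (List Int)), Dom_reorder_ops nop_axes → Pre_reorder_ops nop_axes → Spec_reorder_ops nop_axes (reorder_ops nop_axes)

-- ===== LEMMAS AND PROOFS =====

-- the row of operand opi, and its key with respect to nop_axes' own ndim
def ropsRow (na : List (List Int)) (opi : Int) : List Int := PySem.List.pyGetD na opi []
def ropsKeyOf (na : List (List Int)) (opi : Int) : Int :=
  ropsKey (ropsRow na opi) ((PySem.List.pyGetD na 0 []).length : Int)
-- concatenation of buckets ndim-1 … 0 (descending), bucket j = operands with key j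
def ropsBC (na : List (List Int)) : Nat → List Int
  | 0 => []
  | j + 1 =>
      (PySem.List.pyRange 0 (na.length : Int) 1).filter
        (fun opi => ropsKeyOf na opi == (j : Int)) ++ ropsBC na j

theorem ropsKey_succ (row : List Int) (n : Nat) :
    ropsKey row ((n : Int) + 1) =
      if PySem.List.pyGetD row (n : Int) 0 != -1 then (n : Int) else ropsKey row n := by
  unfold ropsKey
  rw [PySem.List.pyRange_one_succ_right (by exact_mod_cast Nat.zero_le n)]
  rw [List.foldl_append]
  simp

theorem ropsKey_lt (row : List Int) (n : Nat) : ropsKey row (n : Int) < (n : Int) := by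
  induction n with
  | zero => simp [ropsKey, PySem.List.pyRange_one_eq_nil]
  | succ n ih =>
      push_cast
      rw [ropsKey_succ]
      split <;> omega

theorem ropsKey_lb (row : List Int) (n : Nat) : -1 ≤ ropsKey row (n : Int) := by
  induction n with
  | zero => simp [ropsKey, PySem.List.pyRange_one_eq_nil]
  | succ n ih =>
      push_cast
      rw [ropsKey_succ]
      split <;> omega

theorem ropsKey_ge (row : List Int) (j n : Nat) (hj : j < n)
    (hq : PySem.List.pyGetD row (j : Int) 0 != -1) : (j : Int) ≤ ropsKey row (n : Int) := by
  induction n with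
  | zero => omega
  | succ n ih =>
      push_cast
      rw [ropsKey_succ]
      rcases Nat.lt_succ_iff_lt_or_eq.mp hj with h | h
      · have := ih h
        split <;> omega
      · subst h
        simp at hq
        simp [hq]

theorem ropsKey_q (row : List Int) (n : Nat) (h : 0 ≤ ropsKey row (n : Int)) :
    PySem.List.pyGetD row (ropsKey row (n : Int)) 0 != -1 := by
  induction n with
  | zero => simp [ropsKey, PySem.List.pyRange_one_eq_nil] at h
  | succ n ih =>
      push_cast at h ⊢
      rw [ropsKey_succ] at h ⊢
      by_cases hq : row[n]?.getD 0 = -1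
      · simp [hq] at h ⊢
        simpa using ih h
      · simp [hq]

-- A's inner removal loop over a filtered sublist
theorem ropsInner (pr : Int → Bool) :
    ∀ (rs pre perm : List Int), (pre ++ rs).Nodup →
      ((rs.filter pr).foldl
        (fun st2 opi => (st2.1 ++ [opi], (PySem.List.remove? st2.2 opi).getD st2.2))
        (perm, pre ++ rs))
      = (perm ++ rs.filter pr, pre ++ rs.filter (fun x => !pr x)) := by
  intro rs
  induction rs with
  | nil => intro pre perm _; simp
  | cons a rs ih =>
      intro pre perm hnd
      have hnd' : (pre ++ rs).Nodup :=
        List.Nodup.sublist (List.Sublist.append_left (List.sublist_cons_self a rs) pre) hnd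
      have hane : a ∉ pre := by
        intro hmem
        exact (List.disjoint_of_nodup_append hnd) hmem (List.mem_cons_self)
      by_cases hp : pr a
      · have hmem : a ∈ pre ++ a :: rs := by simp
        have hrm : (PySem.List.remove? (pre ++ a :: rs) a).getD (pre ++ a :: rs) = pre ++ rs := by
          rw [PySem.List.remove?_eq_some_erase _ a hmem]
          simp [List.erase_append_right _ hane]
        simp only [List.filter_cons, hp, if_pos, List.foldl_cons, hrm]
        rw [ih pre (perm ++ [a]) hnd']
        simp
      · have hp' : pr a = false := by simpa using hp
        simp only [List.filter_cons, hp', Bool.false_eq_true, if_false, Bool.not_false, if_pos]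
        have hre : pre ++ a :: rs = (pre ++ [a]) ++ rs := by simp
        rw [hre, ih (pre ++ [a]) perm (by simpa using hnd)]
        simp

-- A's outer loop invariant
theorem ropsOuter (na : List (List Int)) (N : Nat)
    (hN : N = (PySem.List.pyGetD na 0 []).length) :
    ∀ (j : Nat), j ≤ N → ∀ (perm : List Int),
      (((PySem.List.pyRange 0 (j : Int) 1).reverse).foldl (ropsStep na)
        (perm, (PySem.List.pyRange 0 (na.length : Int) 1).filter
          (fun opi => decide (ropsKeyOf na opi < (j : Int)))))
      = (perm ++ ropsBC na j,
         (PySem.List.pyRange 0 (na.length : Int) 1).filter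
           (fun opi => ropsKeyOf na opi == -1)) := by
  have hKof : ∀ x, ropsKeyOf na x = ropsKey (ropsRow na x) (N : Int) := by
    intro x; rw [ropsKeyOf, hN]
  intro j
  induction j with
  | zero =>
      intro _ perm
      have hf : (PySem.List.pyRange 0 (na.length : Int) 1).filter
            (fun opi => decide (ropsKeyOf na opi < ((0 : Nat) : Int)))
          = (PySem.List.pyRange 0 (na.length : Int) 1).filter
            (fun opi => ropsKeyOf na opi == -1) := by
        apply List.filter_congr
        intro x _
        have h1 := ropsKey_lb (ropsRow na x) N
        rw [← hKof x] at h1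
        by_cases hK : ropsKeyOf na x = -1
        · simp [hK]
        · have h2 : ¬ ropsKeyOf na x < 0 := by omega
          simp [hK, h2]
      rw [hf]
      simp [ropsBC, PySem.List.pyRange_one_eq_nil le_rfl]
  | succ j ih =>
      intro hj perm
      have hjN : j < N := by omega
      have hkey : ∀ x, -1 ≤ ropsKeyOf na x ∧ ropsKeyOf na x < (N : Int) := by
        intro x
        have h1 := ropsKey_lb (ropsRow na x) N
        have h2 := ropsKey_lt (ropsRow na x) N
        rw [← hKof x] at h1 h2
        exact ⟨h1, h2⟩
      have hstep : ((PySem.List.pyRange 0 (((j + 1 : Nat)) : Int) 1).reverse)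
          = (j : Int) :: (PySem.List.pyRange 0 (j : Int) 1).reverse := by
        push_cast
        rw [PySem.List.pyRange_one_succ_right (by positivity), List.reverse_append]
        simp
      rw [hstep, List.foldl_cons]
      have hc : ∀ x, (decide (ropsKeyOf na x < (((j + 1 : Nat)) : Int)))
          = (decide (ropsKeyOf na x < (j : Int) + 1)) := by
        intro x; push_cast; rfl
      by_cases hS : (PySem.List.pyRange 0 (na.length : Int) 1).filter
          (fun opi => decide (ropsKeyOf na opi < (((j + 1 : Nat)) : Int))) = []
      · have hnil : ∀ x ∈ (PySem.List.pyRange 0 (na.length : Int) 1),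
            ¬ ropsKeyOf na x < ((j + 1 : Nat) : Int) := by
          intro x hx
          have := List.filter_eq_nil_iff.mp hS x hx
          simpa using this
        have hb : (PySem.List.pyRange 0 (na.length : Int) 1).filter
            (fun opi => decide (ropsKeyOf na opi < (j : Int))) = [] := by
          apply List.filter_eq_nil_iff.mpr
          intro x hx
          have := hnil x hx
          simp only [decide_eq_true_eq]
          push_cast at this ⊢
          omega
        have hbj : (PySem.List.pyRange 0 (na.length : Int) 1).filter
            (fun opi => ropsKeyOf na opi == (j : Int)) = [] := by
          apply List.filter_eq_nil_iff.mpr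
          intro x hx
          have := hnil x hx
          simp only [beq_iff_eq]
          push_cast at this
          omega
        rw [hS]
        have h1 : ropsStep na (perm, ([] : List Int)) (j : Int) = (perm, []) := by
          rw [ropsStep]; simp
        rw [h1, ← hb, ih (by omega) perm]
        simp [ropsBC, hbj]
      · have hndS : ((PySem.List.pyRange 0 (na.length : Int) 1).filter
            (fun opi => decide (ropsKeyOf na opi < (((j + 1 : Nat)) : Int)))).Nodup :=
          (PySem.List.nodup_pyRange_one 0 (na.length : Int)).filter _
        have h1 : ropsStep na (perm, (PySem.List.pyRange 0 (na.length : Int) 1).filter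
              (fun opi => decide (ropsKeyOf na opi < (((j + 1 : Nat)) : Int)))) (j : Int)
            = (perm ++ (PySem.List.pyRange 0 (na.length : Int) 1).filter
                 (fun opi => ropsKeyOf na opi == (j : Int)),
               (PySem.List.pyRange 0 (na.length : Int) 1).filter
                 (fun opi => decide (ropsKeyOf na opi < (j : Int)))) := by
          rw [ropsStep]
          rw [if_neg hS]
          have := ropsInner
            (fun opi => PySem.List.pyGetD (PySem.List.pyGetD na opi []) (j : Int) 0 != -1)
            ((PySem.List.pyRange 0 (na.length : Int) 1).filter
              (fun opi => decide (ropsKeyOf na opi < (((j + 1 : Nat)) : Int))))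
            [] perm (by simpa using hndS)
          simp only [List.nil_append] at this
          rw [this]
          simp only [Prod.mk.injEq]
          constructor
          · congr 1
            rw [List.filter_filter]
            apply List.filter_congr
            intro x _
            have hk := hkey x
            by_cases hx : ropsKeyOf na x = (j : Int)
            · have hq := ropsKey_q (ropsRow na x) N (by rw [← hKof x]; omega)
              rw [← hKof x, hx] at hq
              simp only [ropsRow] at hq
              have hq' : ¬ (PySem.List.pyGetD na x [])[j]?.getD 0 = -1 := by simpa using hq
              have hlt : ropsKeyOf na x < ((j + 1 : Nat) : Int) := by rw [hx]; push_cast; omega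
              simp [hx, hq']
            · by_cases hqx : (PySem.List.pyGetD (PySem.List.pyGetD na x []) (j : Int) 0 != -1) = true
              · have hge := ropsKey_ge (ropsRow na x) j N hjN (by simpa [ropsRow] using hqx)
                rw [← hKof x] at hge
                have hle : ¬ ropsKeyOf na x ≤ (j : Int) := by omega
                simp [hx, hle]
              · simp only [Bool.not_eq_true] at hqx
                have hq0 : (PySem.List.pyGetD na x [])[j]?.getD 0 = -1 := by simpa using hqx
                simp [hx, hq0]
          · rw [List.filter_filter]
            apply List.filter_congr
            intro x _
            have hk := hkey x
            by_cases hqx : (PySem.List.pyGetD (PySem.List.pyGetD na x []) (j : Int) 0 != -1) = true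
            · have hge := ropsKey_ge (ropsRow na x) j N hjN (by simpa [ropsRow] using hqx)
              rw [← hKof x] at hge
              have h3 : ¬ ropsKeyOf na x < (j : Int) := by omega
              have hq' : ¬ (PySem.List.pyGetD na x [])[j]?.getD 0 = -1 := by simpa using hqx
              simp [hq', h3]
            · simp only [Bool.not_eq_true] at hqx
              have hne : ropsKeyOf na x ≠ (j : Int) := by
                intro hx
                have hq := ropsKey_q (ropsRow na x) N (by rw [← hKof x]; omega)
                rw [← hKof x, hx] at hq
                simp only [ropsRow] at hq
                rw [hqx] at hq
                simp at hq
              have hq0 : (PySem.List.pyGetD na x [])[j]?.getD 0 = -1 := by simpa using hqx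
              by_cases hlt : ropsKeyOf na x < ((j + 1 : Nat) : Int)
              · have h4 : ropsKeyOf na x < (j : Int) := by push_cast at hlt; omega
                simp [hq0, h4]
                omega
              · have h4 : ¬ ropsKeyOf na x < (j : Int) := by push_cast at hlt; omega
                simp [hq0, h4]
                omega
        rw [h1, ih (by omega)]
        simp [ropsBC]

-- B's bucket-filling loop
theorem ropsBuckets (n : Nat) :
    ∀ (xs : List (List Int)) (s : Int) (bs : List (List Int)), bs.length = n →
      ∀ (j : Nat), j < n →
      (((PySem.List.enumerate xs s).foldl
          (fun bs pr =>
            let m := ropsKey pr.2 (n : Int)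
            if 0 ≤ m then PySem.List.pySetD bs m (PySem.List.pyGetD bs m [] ++ [pr.1])
            else bs) bs))[j]?
      = some ((bs[j]?.getD []) ++ ((PySem.List.enumerate xs s).filter
          (fun pr => ropsKey pr.2 (n : Int) == (j : Int))).map (·.1)) := by
  intro xs
  induction xs with
  | nil =>
      intro s bs hb j hj
      have : j < bs.length := by omega
      simp [PySem.List.enumerate, List.getElem?_eq_getElem this]
  | cons x xs ih =>
      intro s bs hb j hj
      rw [PySem.List.enumerate_cons, List.foldl_cons, List.filter_cons]
      by_cases hm : 0 ≤ ropsKey x (n : Int)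
      · have hmn : ropsKey x (n : Int) < (n : Int) := ropsKey_lt x n
        have hmm : ropsKey x (n : Int) = (((ropsKey x (n : Int)).toNat : Nat) : Int) :=
          (Int.toNat_of_nonneg hm).symm
        simp only [hm, if_pos]
        rw [PySem.List.pySetD_of_nonneg _ _ hm]
        have hb' : (bs.set (ropsKey x (n : Int)).toNat
            (PySem.List.pyGetD bs (ropsKey x (n : Int)) [] ++ [s])).length = n := by
          simp [hb]
        rw [ih (s + 1) _ hb' j hj]
        rw [List.getElem?_set]
        by_cases hkj : (ropsKey x (n : Int)).toNat = j
        · have hlen : j < bs.length := by omega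
          have hcond : (ropsKey x (n : Int) == (j : Int)) = true := by
            simp only [beq_iff_eq]
            omega
          have hpg : PySem.List.pyGetD bs (ropsKey x (n : Int)) [] = bs[j]?.getD [] := by
            rw [hmm, PySem.List.pyGetD_natCast, hkj, List.getD_eq_getElem?_getD]
          simp [hkj, hlen, hcond, hpg]
        · have hcond : (ropsKey x (n : Int) == (j : Int)) = false := by
            simp only [beq_eq_false_iff_ne, ne_eq]
            omega
          simp [hkj, hcond]
      · have hcond : (ropsKey x (n : Int) == (j : Int)) = false := by
          simp only [beq_eq_false_iff_ne, ne_eq]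
          omega
        simp only [hm, if_false, hcond]
        rw [ih (s + 1) _ hb j hj]
        simp

def ropsEmitList (bs : List (List Int)) : Nat → List Int
  | 0 => []
  | j + 1 => bs.getD j [] ++ ropsEmitList bs j

-- B's emission loop
theorem ropsEmit (bs : List (List Int)) :
    ∀ (j : Nat) (perm : List Int),
      (PySem.List.pyRange ((j : Int) - 1) (-1) (-1)).foldl
        (fun perm i => perm ++ PySem.List.pyGetD bs i []) perm
      = perm ++ (ropsEmitList bs j) := by
  intro j
  induction j with
  | zero =>
      intro perm
      rw [PySem.List.pyRange_neg_one_eq_nil (by simp)]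
      simp [ropsEmitList]
  | succ j ih =>
      intro perm
      have h1 : (((j + 1 : Nat) : Int) - 1) = (j : Int) := by push_cast; ring
      rw [h1, PySem.List.pyRange_neg_one_cons (by omega), List.foldl_cons, ih]
      simp [ropsEmitList, List.getD_eq_getElem?_getD]

theorem ropsEmitList_eq_BC (na : List (List Int)) (bs : List (List Int)) (N : Nat)
    (hbuck : ∀ j : Nat, j < N → bs[j]?.getD [] =
      (PySem.List.pyRange 0 (na.length : Int) 1).filter
        (fun opi => ropsKeyOf na opi == (j : Int))) :
    ∀ j : Nat, j ≤ N → ropsEmitList bs j = ropsBC na j := by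
  intro j
  induction j with
  | zero => intro _; rfl
  | succ j ih =>
      intro hj
      show bs.getD j [] ++ ropsEmitList bs j = _
      rw [ih (by omega), List.getD_eq_getElem?_getD, hbuck j (by omega)]
      rfl

theorem reorder_ops_eq_BC (na : List (List Int)) :
    reorder_ops na = ropsBC na ((PySem.List.pyGetD na 0 []).length) := by
  have hfil : (PySem.List.pyRange 0 (na.length : Int) 1).filter
      (fun opi => decide (ropsKeyOf na opi < (((PySem.List.pyGetD na 0 []).length : Nat) : Int)))
      = PySem.List.pyRange 0 (na.length : Int) 1 := by
    apply List.filter_eq_self.mpr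
    intro x _
    simp only [decide_eq_true_eq]
    exact ropsKey_lt (ropsRow na x) ((PySem.List.pyGetD na 0 []).length)
  show (((PySem.List.pyRange 0 (((PySem.List.pyGetD na 0 []).length : Nat) : Int) 1).reverse).foldl
      (ropsStep na) ([], PySem.List.pyRange 0 (na.length : Int) 1)).1 = _
  rw [← hfil, ropsOuter na ((PySem.List.pyGetD na 0 []).length) rfl
      ((PySem.List.pyGetD na 0 []).length) le_rfl []]
  simp

theorem reorder_ops_alt_eq_BC (na : List (List Int)) :
    reorder_ops_alt na = ropsBC na ((PySem.List.pyGetD na 0 []).length) := by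
  have hlen0 : ((PySem.List.pyRange 0 (((PySem.List.pyGetD na 0 []).length : Nat) : Int) 1).map
      (fun _ => ([] : List Int))).length = (PySem.List.pyGetD na 0 []).length := by
    simp [PySem.List.length_pyRange_one]
  show (PySem.List.pyRange ((((PySem.List.pyGetD na 0 []).length : Nat) : Int) - 1) (-1) (-1)).foldl
      (fun perm i => perm ++ PySem.List.pyGetD ((PySem.List.enumerate na 0).foldl
        (fun bs pr =>
          let m := ropsKey pr.2 (((PySem.List.pyGetD na 0 []).length : Nat) : Int)
          if 0 ≤ m then PySem.List.pySetD bs m (PySem.List.pyGetD bs m [] ++ [pr.1])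
          else bs)
        ((PySem.List.pyRange 0 (((PySem.List.pyGetD na 0 []).length : Nat) : Int) 1).map
          (fun _ => []))) i []) [] = _
  rw [ropsEmit _ ((PySem.List.pyGetD na 0 []).length) []]
  rw [ropsEmitList_eq_BC na _ ((PySem.List.pyGetD na 0 []).length) ?_
      ((PySem.List.pyGetD na 0 []).length) le_rfl]
  · simp
  · intro j hj
    rw [ropsBuckets ((PySem.List.pyGetD na 0 []).length) na 0 _ hlen0 j hj]
    have hbs0 : ((PySem.List.pyRange 0 (((PySem.List.pyGetD na 0 []).length : Nat) : Int) 1).map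
        (fun _ => ([] : List Int)))[j]? = some [] := by
      have : j < ((PySem.List.pyRange 0 (((PySem.List.pyGetD na 0 []).length : Nat) : Int) 1).map
          (fun _ => ([] : List Int))).length := by omega
      rw [List.getElem?_eq_getElem this]
      simp
    rw [hbs0]
    simp only [Option.getD_some, List.nil_append]
    rw [PySem.List.enumerate_eq_map_pyRange na [], List.filter_map, List.map_map]
    rw [show ((fun pr : Int × List Int => pr.1) ∘ fun j : Int => (j, PySem.List.pyGetD na j []))
        = fun j : Int => j from rfl]
    rw [List.map_id'']
    · apply List.filter_congr
      intro x _
      simp [ropsKeyOf, ropsRow, Function.comp]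
    · exact fun x => rfl

-- ===== VERDICT (by name: the statement is the Claim_ definition above) =====
theorem reorder_ops_spec : Claim_equal_reorder_ops := by
  intro na _ _
  unfold Spec_reorder_ops
  rw [reorder_ops_eq_BC, reorder_ops_alt_eq_BC]
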